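-- pv_equiv track=rewrite | github.com/soumilk91/DS-Algo-In-Python | IK/Adhoc-Practice/2DArraySearch.py | search
-- ===== SOURCE A (Python) =====
-- def search(numbers, queries):
--     """
--     Args:
--      numbers(list_list_int32)
--      queries(list_int32)
--     Returns:
--      list_bool
--     """
--     # Write your code here.
--
--     querieSet = set(queries)
--     resSet = set()
--     for i in range(len(numbers)):
--         for j in range(len(numbers[0])):
--             if numbers[i][j] in querieSet:
--                 resSet.add(numbers[i][j])
--
--     res = []
--     for q in queries:
--         if q in resSet:
--             res.append(True)
--         else:
--             res.append(False)
--
--     return res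
-- ===== SOURCE B (Python) =====
-- def search(numbers, queries):
--     width = len(numbers[0]) if numbers else 0
--     vals = sorted(numbers[i][j] for i in range(len(numbers)) for j in range(width))
--
--     def contains(x):
--         lo, hi = 0, len(vals)
--         while lo < hi:
--             mid = (lo + hi) // 2
--             if vals[mid] < x:
--                 lo = mid + 1
--             else:
--                 hi = mid
--         return lo < len(vals) and vals[lo] == x
--
--     return [contains(q) for q in queries]
-- ===== Notes on version B (the rewrite author's own statement) =====
-- stated objective: alternative
-- what changed: B drops both of A's hash sets: it flattens the scanned matrix values into one list, sorts it once, and answers each query with a hand-written binary search over the sorted list.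
import Mathlib
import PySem

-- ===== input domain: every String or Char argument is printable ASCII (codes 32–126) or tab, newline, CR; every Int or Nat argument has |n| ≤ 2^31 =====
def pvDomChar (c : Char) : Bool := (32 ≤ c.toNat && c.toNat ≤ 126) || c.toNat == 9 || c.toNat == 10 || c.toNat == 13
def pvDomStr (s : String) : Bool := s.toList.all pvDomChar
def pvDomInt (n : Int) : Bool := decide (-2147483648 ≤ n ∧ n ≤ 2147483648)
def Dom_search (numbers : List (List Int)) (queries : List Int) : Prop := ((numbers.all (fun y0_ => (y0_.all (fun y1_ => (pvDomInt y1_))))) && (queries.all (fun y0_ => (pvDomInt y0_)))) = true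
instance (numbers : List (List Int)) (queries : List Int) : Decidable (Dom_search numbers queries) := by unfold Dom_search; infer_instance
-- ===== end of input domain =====

-- B replaces A's query-set + filter-during-scan with sort-then-binary-search:
-- it flattens the scanned matrix values, sorts them once, and answers each query
-- by a hand-written binary search (objective: alternative; no set at all).


-- ===== PORT A =====
def search (numbers : List (List Int)) (queries : List Int) : List Bool :=
  let querieSet := PySem.Set.ofList queries
  let resSet :=
    (PySem.List.pyRange 0 numbers.length 1).foldl (fun rs i =>
      (PySem.List.pyRange 0 ((PySem.List.pyGetD numbers 0 []).length : Int) 1).foldl (fun rs j =>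
        if PySem.Set.contains querieSet (PySem.List.pyGetD (PySem.List.pyGetD numbers i []) j 0)
        then PySem.Set.add rs (PySem.List.pyGetD (PySem.List.pyGetD numbers i []) j 0)
        else rs) rs) PySem.Set.empty
  queries.foldl (fun res q =>
    if PySem.Set.contains resSet q then res ++ [true] else res ++ [false]) []

-- ===== PORT B =====
-- Python's `while lo < hi` loop; lo, hi are the nonnegative indices 0 ≤ lo ≤ hi ≤ len(vals),
-- so Nat and `(lo+hi)/2` (Nat division) match Python's ints and `//` exactly here.
def bsLoop (vals : List Int) (x : Int) (lo hi : Nat) : Nat :=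
  if h : lo < hi then
    let mid := (lo + hi) / 2
    if PySem.List.pyGetD vals (mid : Int) 0 < x then bsLoop vals x (mid + 1) hi
    else bsLoop vals x lo mid
  else lo
termination_by hi - lo
decreasing_by all_goals omega

-- Python's `contains(x)`: `return lo < len(vals) and vals[lo] == x`
def bsContains (vals : List Int) (x : Int) : Bool :=
  let lo := bsLoop vals x 0 vals.length
  decide (lo < vals.length) && (PySem.List.pyGetD vals (lo : Int) 0 == x)

def search_alt (numbers : List (List Int)) (queries : List Int) : List Bool :=
  let width : Int := if numbers.isEmpty then 0 else ((PySem.List.pyGetD numbers 0 []).length : Int)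
  let vals := PySem.List.sorted
    ((PySem.List.pyRange 0 numbers.length 1).flatMap (fun i =>
      (PySem.List.pyRange 0 width 1).map (fun j =>
        PySem.List.pyGetD (PySem.List.pyGetD numbers i []) j 0)))
    (fun x => x) false
  queries.map (fun q => bsContains vals q)

-- ===== PRECONDITION & SPEC =====
-- Pre_ excludes exactly the ragged matrices on which Python A raises IndexError:
-- some row shorter than row 0 (A indexes every row up to len(numbers[0])).
def Pre_search (numbers : List (List Int)) (queries : List Int) : Prop :=
  ∀ row ∈ numbers, (numbers.headD []).length ≤ row.length
instance (numbers : List (List Int)) (queries : List Int) : Decidable (Pre_search numbers queries) := by unfold Pre_search; infer_instance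
def pvWitness_search : List (List Int) × List Int := ([[1, 2], [3, 4]], [2, 5])

def Spec_search (numbers : List (List Int)) (queries : List Int) (out : List Bool) : Prop := out = search_alt numbers queries
instance (numbers : List (List Int)) (queries : List Int) (out : List Bool) : Decidable (Spec_search numbers queries out) := by unfold Spec_search; infer_instance

-- ===== CLAIM =====
def Claim_equal_search : Prop := ∀ (numbers : List (List Int)) (queries : List Int), Dom_search numbers queries → Pre_search numbers queries → Spec_search numbers queries (search numbers queries)

-- ===== LEMMAS AND PROOFS =====

-- A's result loop (branching append) is a map over queries.
theorem foldl_res (rS : PySem.Set Int) (l : List Int) (res : List Bool) :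
    (l.foldl (fun res q => if PySem.Set.contains rS q then res ++ [true] else res ++ [false]) res)
    = res ++ l.map (fun q => PySem.Set.contains rS q) := by
  induction l generalizing res with
  | nil => simp
  | cons q t ih =>
    simp only [List.foldl_cons, List.map_cons]
    by_cases h : PySem.Set.contains rS q = true
    · rw [if_pos h, ih, h]; simp
    · rw [if_neg h, ih, eq_false_of_ne_true h]; simp

-- Membership of A's inner row fold: old elements, plus scanned values that are queries.
theorem mem_inner (qS : PySem.Set Int) (l : List Int) (g : Int → Int)
    (rs : PySem.Set Int) (x : Int) :
    (x ∈ l.foldl (fun rs j => if PySem.Set.contains qS (g j) then PySem.Set.add rs (g j) else rs) rs)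
    ↔ x ∈ rs ∨ (x ∈ qS ∧ ∃ j ∈ l, g j = x) := by
  induction l generalizing rs with
  | nil => simp
  | cons j t ih =>
    simp only [List.foldl_cons, List.mem_cons, ih]
    by_cases hq : PySem.Set.contains qS (g j) = true
    · have hqm : g j ∈ qS := (PySem.Set.contains_iff _ _).mp hq
      simp only [hq, if_pos, PySem.Set.mem_add]
      constructor
      · rintro ((hx | rfl) | ⟨hxq, j', hj', rfl⟩)
        · exact Or.inl hx
        · exact Or.inr ⟨hqm, j, Or.inl rfl, rfl⟩
        · exact Or.inr ⟨hxq, j', Or.inr hj', rfl⟩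
      · rintro (hx | ⟨hxq, j', (rfl | hj'), rfl⟩)
        · exact Or.inl (Or.inl hx)
        · exact Or.inl (Or.inr rfl)
        · exact Or.inr ⟨hxq, j', hj', rfl⟩
    · simp only [hq, Bool.false_eq_true, if_false]
      constructor
      · rintro (hx | ⟨hxq, j', hj', rfl⟩)
        · exact Or.inl hx
        · exact Or.inr ⟨hxq, j', Or.inr hj', rfl⟩
      · rintro (hx | ⟨hxq, j', (rfl | hj'), rfl⟩)
        · exact Or.inl hx
        · exact absurd ((PySem.Set.contains_iff _ _).mpr hxq) hq
        · exact Or.inr ⟨hxq, j', hj', rfl⟩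

-- Same, carried through A's outer row loop.
theorem mem_outer (qS : PySem.Set Int) (l : List Int) (inner : Int → List Int)
    (g : Int → Int → Int) (rs : PySem.Set Int) (x : Int) :
    (x ∈ l.foldl (fun rs i => (inner i).foldl (fun rs j => if PySem.Set.contains qS (g i j) then PySem.Set.add rs (g i j) else rs) rs) rs)
    ↔ x ∈ rs ∨ (x ∈ qS ∧ ∃ i ∈ l, ∃ j ∈ inner i, g i j = x) := by
  induction l generalizing rs with
  | nil => simp
  | cons i t ih =>
    simp only [List.foldl_cons, List.mem_cons, ih, mem_inner]
    constructor
    · rintro ((hx | ⟨hq, j, hj, rfl⟩) | ⟨hq, i', hi', hrest⟩)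
      · exact Or.inl hx
      · exact Or.inr ⟨hq, i, Or.inl rfl, j, hj, rfl⟩
      · exact Or.inr ⟨hq, i', Or.inr hi', hrest⟩
    · rintro (hx | ⟨hq, i', (rfl | hi'), hrest⟩)
      · exact Or.inl (Or.inl hx)
      · exact Or.inl (Or.inr ⟨hq, hrest⟩)
      · exact Or.inr ⟨hq, i', hi', hrest⟩

-- Sorted lists are monotone by index (getD form).
theorem sorted_getD_mono (vals : List Int) (hp : vals.Pairwise (· ≤ ·))
    {i j : Nat} (hij : i ≤ j) (hj : j < vals.length) :
    vals.getD i 0 ≤ vals.getD j 0 := by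
  rcases Nat.lt_or_ge i j with h | h
  · rw [List.getD_eq_getElem _ _ (by omega), List.getD_eq_getElem _ _ hj]
    exact List.pairwise_iff_getElem.mp hp i j (by omega) hj h
  · have : i = j := by omega
    subst this; exact le_rfl

-- Binary-search loop invariant: everything left of the result is < x,
-- everything right of it (in range) is ≥ x.
theorem bsLoop_spec (vals : List Int) (hp : vals.Pairwise (· ≤ ·)) (x : Int) :
    ∀ (lo hi : Nat), lo ≤ hi → hi ≤ vals.length →
      (∀ i, i < lo → vals.getD i 0 < x) →
      (∀ i, hi ≤ i → i < vals.length → x ≤ vals.getD i 0) →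
      (∀ i, i < bsLoop vals x lo hi → vals.getD i 0 < x) ∧
      (∀ i, bsLoop vals x lo hi ≤ i → i < vals.length → x ≤ vals.getD i 0) ∧
      bsLoop vals x lo hi ≤ vals.length := by
  intro lo hi
  induction lo, hi using bsLoop.induct vals x with
  | case1 lo hi h mid hlt ih =>
    intro _ hhi hL hR
    rw [bsLoop, dif_pos h]
    simp only [show (lo + hi) / 2 = mid from rfl, if_pos hlt]
    refine ih (by omega) hhi ?_ hR
    intro i hi'
    rcases Nat.lt_or_ge i lo with hil | hil
    · exact hL i hil
    · calc vals.getD i 0 ≤ vals.getD mid 0 := sorted_getD_mono vals hp (by omega) (by omega)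
        _ = PySem.List.pyGetD vals (mid : Int) 0 := by rw [PySem.List.pyGetD_natCast]
        _ < x := hlt
  | case2 lo hi h mid hge ih =>
    intro hlohi hhi hL hR
    rw [bsLoop, dif_pos h]
    simp only [show (lo + hi) / 2 = mid from rfl, if_neg hge]
    refine ih (by omega) (by omega) hL ?_
    intro i hmi hilen
    calc x ≤ PySem.List.pyGetD vals (mid : Int) 0 := le_of_not_gt hge
      _ = vals.getD mid 0 := PySem.List.pyGetD_natCast vals mid 0
      _ ≤ vals.getD i 0 := sorted_getD_mono vals hp hmi hilen
  | case3 lo hi h =>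
    intro hlohi hhi hL hR
    rw [bsLoop, dif_neg h]
    exact ⟨hL, fun i hi' => hR i (by omega), by omega⟩

-- On a sorted list, `contains` decides membership.
theorem bsContains_iff (vals : List Int) (hp : vals.Pairwise (· ≤ ·)) (x : Int) :
    bsContains vals x = true ↔ x ∈ vals := by
  obtain ⟨hL, hR, hlen⟩ := bsLoop_spec vals hp x 0 vals.length (Nat.zero_le _) le_rfl
    (fun i hi => absurd hi (Nat.not_lt_zero i)) (fun i hi hlt => absurd hlt (by omega))
  unfold bsContains
  set r := bsLoop vals x 0 vals.length with hr
  constructor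
  · intro hc
    simp only [Bool.and_eq_true, decide_eq_true_eq, beq_iff_eq] at hc
    obtain ⟨hrlen, heq⟩ := hc
    rw [PySem.List.pyGetD_natCast] at heq
    rw [← heq, List.getD_eq_getElem _ _ hrlen]
    exact List.getElem_mem _
  · intro hx
    obtain ⟨k, hk, hkx⟩ := List.mem_iff_getElem.mp hx
    have hkD : vals.getD k 0 = x := by rw [List.getD_eq_getElem _ _ hk, hkx]
    have hrk : r ≤ k := by
      by_contra hcon
      exact absurd hkD (ne_of_lt (hL k (by omega)))
    have hrlen : r < vals.length := by omega
    have h1 : x ≤ vals.getD r 0 := hR r le_rfl hrlen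
    have h2 : vals.getD r 0 ≤ x := hkD ▸ sorted_getD_mono vals hp hrk hk
    simp only [Bool.and_eq_true, decide_eq_true_eq, beq_iff_eq]
    exact ⟨hrlen, by rw [PySem.List.pyGetD_natCast]; omega⟩

-- ===== VERDICT =====
theorem search_spec : Claim_equal_search := by
  intro numbers queries _ _
  unfold Spec_search search search_alt
  rw [foldl_res]
  simp only [List.nil_append]
  apply List.map_congr_left
  intro q hq
  have hqS : q ∈ PySem.Set.ofList queries := (PySem.Set.mem_ofList _ _).mpr hq
  -- width used by B equals the bound used by A wherever the outer range is nonempty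
  have hwidth : (PySem.List.pyRange 0 numbers.length 1).flatMap (fun i =>
      (PySem.List.pyRange 0 (if numbers.isEmpty then 0 else ((PySem.List.pyGetD numbers 0 []).length : Int)) 1).map (fun j =>
        PySem.List.pyGetD (PySem.List.pyGetD numbers i []) j 0))
      = (PySem.List.pyRange 0 numbers.length 1).flatMap (fun i =>
      (PySem.List.pyRange 0 ((PySem.List.pyGetD numbers 0 []).length : Int) 1).map (fun j =>
        PySem.List.pyGetD (PySem.List.pyGetD numbers i []) j 0)) := by
    cases numbers with
    | nil => simp [PySem.List.pyRange_one_eq_nil]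
    | cons r t => simp [List.isEmpty]
  rw [hwidth]
  set flat := (PySem.List.pyRange 0 numbers.length 1).flatMap (fun i =>
      (PySem.List.pyRange 0 ((PySem.List.pyGetD numbers 0 []).length : Int) 1).map (fun j =>
        PySem.List.pyGetD (PySem.List.pyGetD numbers i []) j 0)) with hflat
  have hb : bsContains (PySem.List.sorted flat (fun x => x) false) q
      = decide (q ∈ flat) := by
    rw [Bool.eq_iff_iff, bsContains_iff _ (PySem.List.sorted_pairwise flat (fun x => x)) q,
      PySem.List.mem_sorted]
    simp
  rw [hb]
  have ha : (PySem.Set.contains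
      ((PySem.List.pyRange 0 numbers.length 1).foldl (fun rs i =>
        (PySem.List.pyRange 0 ((PySem.List.pyGetD numbers 0 []).length : Int) 1).foldl (fun rs j =>
          if PySem.Set.contains (PySem.Set.ofList queries) (PySem.List.pyGetD (PySem.List.pyGetD numbers i []) j 0)
          then PySem.Set.add rs (PySem.List.pyGetD (PySem.List.pyGetD numbers i []) j 0)
          else rs) rs) PySem.Set.empty) q) = decide (q ∈ flat) := by
    rw [Bool.eq_iff_iff, PySem.Set.contains_iff, mem_outer]
    simp only [hflat, List.mem_flatMap, List.mem_map]
    simp only [decide_eq_true_eq]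
    constructor
    · rintro (hemp | ⟨_, i, hi, j, hj, rfl⟩)
      · exact absurd hemp (by simp [PySem.Set.empty])
      · exact ⟨i, hi, j, hj, rfl⟩
    · rintro ⟨i, hi, j, hj, rfl⟩
      exact Or.inr ⟨hqS, i, hi, j, hj, rfl⟩
  rw [ha]
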